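-- pv_equiv track=rewrite | github.com/clinbio-lab/gbtools | genetic_barcode/utils/hashing.py | gt_recode
-- ===== SOURCE A (Python) =====
-- def get_chunks(gt_string: str, chunk_size: int):
--     """
--     Split a genotype string into fixed-size chunks.
--
--     :param gt_string: String of encoded genotypes.
--     :param chunk_size: Size of each chunk.
--     :return: List of genotype chunks.
--     """
--     return [gt_string[i:i+chunk_size] for i in range(0, len(gt_string), chunk_size)]
--
-- def gt_recode(gt_string: str) -> str:
--     gt_chunks = get_chunks(gt_string, 2)
--     recoded = ''
--     for gt in gt_chunks:
--         if gt in ('00', '11', '22'):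
--             recoded += '1'
--         elif gt in ('01', '12', '20'):
--             recoded += '2'
--         elif gt in ( "02", "10", "21"):
--             recoded += '3'
--         else:
--             recoded += '0'
--     return recoded
-- ===== SOURCE B (Python) =====
-- _TABLE = {a + b: str((ord(b) - ord(a)) % 3 + 1) for a in '012' for b in '012'}
--
-- def gt_recode(gt_string: str) -> str:
--     out = []
--     it = iter(gt_string)
--     for first in it:
--         out.append(_TABLE.get(first + next(it, ''), '0'))
--     return ''.join(out)
-- ===== Notes on version B (the rewrite author's own statement) =====
-- stated objective: faster
-- what changed: Replaces A's index-range slicing into a chunk list plus a three-branch nine-pair membership chain by a single pass that pairs characters straight off an iterator and classifies each pair through a 9-entry lookup table precomputed once (dict with default '0'), joining the collected digits instead of repeated string concatenation.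
import Mathlib
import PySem

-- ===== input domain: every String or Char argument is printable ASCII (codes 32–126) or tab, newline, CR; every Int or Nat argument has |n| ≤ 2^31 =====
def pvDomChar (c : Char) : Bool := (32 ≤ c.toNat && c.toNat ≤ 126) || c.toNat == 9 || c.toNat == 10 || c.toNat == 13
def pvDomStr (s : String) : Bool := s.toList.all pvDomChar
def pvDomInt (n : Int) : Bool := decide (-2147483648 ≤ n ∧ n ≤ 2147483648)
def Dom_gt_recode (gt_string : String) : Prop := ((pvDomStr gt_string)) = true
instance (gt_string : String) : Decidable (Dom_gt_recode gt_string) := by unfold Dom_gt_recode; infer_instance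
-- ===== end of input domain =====

-- B replaces A's index/slice chunking plus three nine-pair membership branches by a single
-- iterator-pairing pass that classifies each pair via a 9-entry lookup table built once; objective: faster (constant factor, measured).

-- ===== PORT A =====
-- get_chunks(gt_string, 2): [gt_string[i:i+chunk_size] for i in range(0, len(gt_string), chunk_size)]
def pvChunksA (cs : List Char) (k : Int) : List (List Char) :=
  (PySem.List.pyRange 0 (PySem.List.len cs) k).map
    (fun i => PySem.List.slice cs (some i) (some (i + k)))

-- the body of A's for-loop: which 1-char string is appended for chunk gt
def pvDigitA (gt : List Char) : List Char :=
  if gt ∈ [['0','0'], ['1','1'], ['2','2']] then ['1']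
  else if gt ∈ [['0','1'], ['1','2'], ['2','0']] then ['2']
  else if gt ∈ [['0','2'], ['1','0'], ['2','1']] then ['3']
  else ['0']

def gt_recode (gt_string : String) : String :=
  String.ofList ((pvChunksA gt_string.toList 2).foldl (fun recoded gt => recoded ++ pvDigitA gt) [])

-- ===== PORT B =====
-- _TABLE = {a + b: str((ord(b) - ord(a)) % 3 + 1) for a in '012' for b in '012'}
def pvTableB : PySem.Dict (List Char) (List Char) :=
  (['0','1','2'].flatMap (fun a => ['0','1','2'].map (fun b => (a, b)))).foldl
    (fun d p => PySem.Dict.insert d [p.1, p.2]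
        (PySem.Int.toChars (PySem.Int.mod ((p.2.toNat : Int) - (p.1.toNat : Int)) 3 + 1)))
    PySem.Dict.empty

-- the for-loop over iter(gt_string): consumes one char, pulls a second with next(it, ''),
-- appends _TABLE.get(pair, '0'); an exhausted iterator gives '' so the key is the 1-char string.
def pvPairLoopB : List Char → List (List Char) → List (List Char)
  | [], out => out
  | [c], out => out ++ [PySem.Dict.getD pvTableB [c] ['0']]
  | c :: d :: t, out => pvPairLoopB t (out ++ [PySem.Dict.getD pvTableB [c, d] ['0']])

-- ''.join(out)
def gt_recode_alt (gt_string : String) : String :=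
  String.ofList (pvPairLoopB gt_string.toList []).flatten

-- ===== PRECONDITION & SPEC =====
def Spec_gt_recode (gt_string : String) (out : String) : Prop := out = gt_recode_alt gt_string
instance (gt_string : String) (out : String) : Decidable (Spec_gt_recode gt_string out) := by unfold Spec_gt_recode; infer_instance

-- ===== CLAIM (what is proved, stated in full; the proofs are below) =====
def Claim_equal_gt_recode : Prop := ∀ (gt_string : String), Dom_gt_recode gt_string → Spec_gt_recode gt_string (gt_recode gt_string)

-- ===== LEMMAS AND PROOFS =====

-- common structural chunking used only by the proofs
def pvChunks2 : List Char → List (List Char)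
  | [] => []
  | [c] => [[c]]
  | c :: d :: t => [c, d] :: pvChunks2 t

-- the 9-entry table, evaluated once to its literal association list
theorem pvTableB_items :
    pvTableB.items = [(['0','0'],['1']),(['0','1'],['2']),(['0','2'],['3']),
      (['1','0'],['3']),(['1','1'],['1']),(['1','2'],['2']),
      (['2','0'],['2']),(['2','1'],['3']),(['2','2'],['1'])] := by decide

-- A's chunk classifier agrees with B's table lookup on EVERY chunk
theorem pvDigitA_eq_table (gt : List Char) :
    pvDigitA gt = PySem.Dict.getD pvTableB gt ['0'] := by
  have htab : pvTableB = PySem.Dict.mk [(['0','0'],['1']),(['0','1'],['2']),(['0','2'],['3']),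
      (['1','0'],['3']),(['1','1'],['1']),(['1','2'],['2']),
      (['2','0'],['2']),(['2','1'],['3']),(['2','2'],['1'])] := by
    cases h : pvTableB with
    | mk items => rw [← h, ← pvTableB_items]
  rw [htab]
  match gt with
  | [] => decide
  | [c] =>
    simp [pvDigitA, PySem.Dict.getD, PySem.Dict.get?]
  | c :: d :: e :: t =>
    simp [pvDigitA, PySem.Dict.getD, PySem.Dict.get?]
  | [c, d] =>
    by_cases hc : c = '0' ∨ c = '1' ∨ c = '2'
    · by_cases hd : d = '0' ∨ d = '1' ∨ d = '2'
      · rcases hc with rfl | rfl | rfl <;> rcases hd with rfl | rfl | rfl <;> decide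
      · push Not at hd
        simp [pvDigitA, PySem.Dict.getD, PySem.Dict.get?,
          hd.1, hd.2.1, hd.2.2, Ne.symm hd.1, Ne.symm hd.2.1, Ne.symm hd.2.2]
    · push Not at hc
      simp [pvDigitA, PySem.Dict.getD, PySem.Dict.get?,
        hc.1, hc.2.1, hc.2.2, Ne.symm hc.1, Ne.symm hc.2.1, Ne.symm hc.2.2]

-- range(0, n, 2) in closed form (n >= 0)
theorem pvPyRange_two (n : Int) (hn : 0 <= n) :
    PySem.List.pyRange 0 n 2
      = (List.range ((n + 1) / 2).toNat).map (fun k : Nat => ((2 * k : Nat) : Int)) := by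
  rw [PySem.List.pyRange_of_pos 0 n (by norm_num)]
  by_cases h : (0 : Int) < n
  · simp only [h, if_pos]
    have : ((n - 0 + 2 - 1) / 2).toNat = ((n + 1) / 2).toNat := by omega
    rw [this]
    apply List.map_congr_left
    intro k _
    push_cast
    ring
  · have hn0 : n = 0 := le_antisymm (not_lt.mp h) hn
    subst hn0
    norm_num

-- structural chunking as drop/take windows
theorem pvChunks2_windows (cs : List Char) :
    (List.range ((cs.length + 1) / 2)).map (fun k => (cs.drop (2 * k)).take 2)
      = pvChunks2 cs := by
  match cs with
  | [] => rfl
  | [c] => simp [List.range_succ, pvChunks2]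
  | c :: d :: t =>
    have ih := pvChunks2_windows t
    have hm : (c :: d :: t).length.succ / 2 = t.length.succ / 2 + 1 := by
      simp only [List.length_cons]; omega
    rw [pvChunks2, show ((c :: d :: t).length + 1) / 2 = t.length.succ / 2 + 1 from hm,
      List.range_succ_eq_map, List.map_cons, List.map_map]
    refine congrArg₂ List.cons rfl ?_
    rw [← ih]
    apply List.map_congr_left
    intro k _
    simp only [Function.comp_def, Nat.succ_eq_add_one]
    congr 1

-- A's comprehension chunking is the structural chunking
theorem pvChunksA_eq_chunks2 (cs : List Char) : pvChunksA cs 2 = pvChunks2 cs := by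
  unfold pvChunksA
  rw [show PySem.List.len cs = (cs.length : Int) from PySem.List.len_eq cs,
    pvPyRange_two _ (by positivity), List.map_map]
  rw [← pvChunks2_windows cs]
  have hm : (((cs.length : Int) + 1) / 2).toNat = (cs.length + 1) / 2 := by omega
  rw [hm]
  apply List.map_congr_left
  intro k _
  simp only [Function.comp_def]
  rw [show ((2 * k : Nat) : Int) + 2 = ((2 * k + 2 : Nat) : Int) from by push_cast; ring,
    PySem.List.slice_natCast]
  congr 1
  omega

-- B's accumulating pair loop, flattened, is the table digits of the structural chunks
theorem pvPairLoopB_eq (cs : List Char) (out : List (List Char)) :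
    pvPairLoopB cs out = out ++ (pvChunks2 cs).map (fun gt => PySem.Dict.getD pvTableB gt ['0']) := by
  match cs with
  | [] => simp [pvPairLoopB, pvChunks2]
  | [c] => simp [pvPairLoopB, pvChunks2]
  | c :: d :: t =>
    rw [pvPairLoopB, pvPairLoopB_eq t, pvChunks2]
    simp

-- ===== VERDICT (by name: the statement is the Claim_ definition above) =====
theorem gt_recode_spec : Claim_equal_gt_recode := by
  intro s _
  unfold Spec_gt_recode gt_recode gt_recode_alt
  rw [PySem.List.foldl_append_eq_flatMap, pvChunksA_eq_chunks2, pvPairLoopB_eq]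
  simp [List.flatMap_def, funext pvDigitA_eq_table]
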